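-- pv_equiv track=rewrite | github.com/vacuumlabs/ledger-app-cardano-shelley | tests/utils.py | _appenduint32
-- ===== SOURCE A (Python) =====
-- def _appenduint32(value: int) -> str:
--     """Append a Variable Length uint32 to a buffer"""
--
--     if value == 0:
--         return "00"
--
--     chunks: list[int] = []
--     while value:
--         chunks.append(value & 0x7F)
--         value >>= 7
--
--     result = ""
--     while len(chunks) > 1:
--         result += f"{chunks.pop() | 0x80:02x}"
--     result += f"{chunks.pop():02x}"
--     return result
-- ===== SOURCE B (Python) =====
-- def _appenduint32(value: int) -> str:
--     """Append a Variable Length uint32 to a buffer"""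
--     n = max(1, (value.bit_length() + 6) // 7)
--     result = ""
--     for i in range(n - 1, -1, -1):
--         chunk = (value >> (7 * i)) & 0x7F
--         if i > 0:
--             chunk |= 0x80
--         result += f"{chunk:02x}"
--     return result
-- ===== Notes on version B (the rewrite author's own statement) =====
-- stated objective: simpler
-- what changed: B computes the chunk count in closed form from value.bit_length() and emits the bytes MSB-first in a single forward loop, dropping A's intermediate chunks list and its second stack-popping emission loop.
import Mathlib
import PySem

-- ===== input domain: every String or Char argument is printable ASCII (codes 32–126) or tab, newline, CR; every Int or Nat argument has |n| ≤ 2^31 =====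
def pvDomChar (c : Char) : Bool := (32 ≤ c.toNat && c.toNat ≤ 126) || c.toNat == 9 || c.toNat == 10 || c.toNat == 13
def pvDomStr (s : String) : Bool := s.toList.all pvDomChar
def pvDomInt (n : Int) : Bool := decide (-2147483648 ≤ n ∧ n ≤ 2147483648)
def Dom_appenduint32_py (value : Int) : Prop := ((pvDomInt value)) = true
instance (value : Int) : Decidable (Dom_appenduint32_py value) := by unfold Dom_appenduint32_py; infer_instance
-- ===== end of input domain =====

-- B replaces A's two phases (build an LSB-first chunk list, then emit it by popping) with a
-- closed-form chunk count from bit_length and a single MSB-first emission loop (objective: simpler).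

-- f"{x:02x}" for 0 ≤ x < 256 (the only values formatted here): exactly two lowercase hex digits.
def hexDigit (n : Nat) : Char := if n < 10 then Char.ofNat (48 + n) else Char.ofNat (87 + n)
def hex2 (x : Int) : String := String.ofList [hexDigit (x.toNat / 16), hexDigit (x.toNat % 16)]

theorem shift7_toNat_lt (v : Int) (h : 0 < v) : (v >>> (7:Nat)).toNat < v.toNat := by
  rw [Int.shiftRight_eq_div_pow]; norm_num; omega

-- ===== PORT A =====
-- 'while value: chunks.append(value & 0x7F); value >>= 7' — guard written '0 < value' to make the
-- recursion total in Lean; identical to Python's 'value != 0' on the nonnegative inputs of Pre_.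
def chunksOfA (value : Int) : List Int :=
  if h : 0 < value then
    PySem.Int.band value 127 :: chunksOfA (value >>> (7:Nat))
  else []
termination_by value.toNat
decreasing_by exact shift7_toNat_lt value h

-- the two emission 'while' loops over chunks.pop()
def emitA (chunks : List Int) (result : String) : String :=
  if chunks.length > 1 then
    match h : PySem.List.pop? chunks with
    | some (c, rest) => emitA rest (result ++ hex2 (PySem.Int.bor c 128))
    | none => result   -- unreachable: length > 1
  else
    match PySem.List.pop? chunks with
    | some (c, _) => result ++ hex2 c
    | none => result   -- Python raises on an empty list; unreachable (chunks ≠ [] when called)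
termination_by chunks.length
decreasing_by
  have := PySem.List.length_of_pop?_eq_some chunks h
  simp at this
  omega

def appenduint32_py (value : Int) : String :=
  if value == 0 then "00"
  else emitA (chunksOfA value) ""

-- ===== PORT B =====
-- value.bit_length() ported as Nat.size (exact for the 0 ≤ value inputs of Pre_);
-- value >> (7*i) ported with a Nat shift (i ≥ 0 throughout the countdown range).
def appenduint32_py_alt (value : Int) : String :=
  let n : Int := max 1 (PySem.Int.floordiv ((value.toNat.size : Int) + 6) 7)
  (PySem.List.pyRange (n - 1) (-1) (-1)).foldl (fun result i =>
    let chunk := PySem.Int.band (value >>> (7 * i).toNat) 127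
    let chunk := if 0 < i then PySem.Int.bor chunk 128 else chunk
    result ++ hex2 chunk) ""

-- ===== PRECONDITION & SPEC =====
-- Pre_ excludes negative values: there Python A's 'value >>= 7' never reaches 0 and A loops forever.
def Pre_appenduint32_py (value : Int) : Prop := 0 ≤ value
instance (value : Int) : Decidable (Pre_appenduint32_py value) := by unfold Pre_appenduint32_py; infer_instance
def pvWitness_appenduint32_py : Int := 300

def Spec_appenduint32_py (value : Int) (out : String) : Prop := out = appenduint32_py_alt value
instance (value : Int) (out : String) : Decidable (Spec_appenduint32_py value out) := by unfold Spec_appenduint32_py; infer_instance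

-- ===== CLAIM (what is proved, stated in full; the proofs are below) =====
def Claim_equal_appenduint32_py : Prop := ∀ (value : Int), Dom_appenduint32_py value → Pre_appenduint32_py value → Spec_appenduint32_py value (appenduint32_py value)

-- ===== LEMMAS AND PROOFS =====

-- pivot: the string emitted for an MSB-first chunk list (continuation flag on all but the last chunk)
def encRev : List Int → String
  | [] => ""
  | [c] => hex2 c
  | c :: d :: rest => hex2 (PySem.Int.bor c 128) ++ encRev (d :: rest)

theorem encRev_cons (x d : Int) (rest : List Int) :
    encRev (x :: d :: rest) = hex2 (PySem.Int.bor x 128) ++ encRev (d :: rest) := rfl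

theorem shift_intCast (v : Int) (k : Nat) : v >>> ((k : Int)) = v >>> k := by
  show v <<< (-(k:Int)) = v >>> k
  cases v with
  | ofNat n => cases k with
    | zero => rfl
    | succ m => rfl
  | negSucc n => cases k with
    | zero => rfl
    | succ m => rfl

theorem toNat_shift7 (v : Int) (h : 0 ≤ v) : (v >>> (7:Nat)).toNat = v.toNat / 128 := by
  rw [Int.shiftRight_eq_div_pow]; norm_num; omega

theorem size_div128 (m : Nat) (h : 128 ≤ m) : (m / 128).size = m.size - 7 := by
  have hs : 8 ≤ m.size := by
    have h2 : (2:Nat)^7 ≤ m := by norm_num; omega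
    have := Nat.lt_size.mpr h2; omega
  apply le_antisymm
  · rw [Nat.size_le]
    have hm : m < 2 ^ m.size := Nat.lt_size_self m
    rw [Nat.div_lt_iff_lt_mul (by norm_num)]
    calc m < 2 ^ m.size := hm
    _ = 2 ^ (m.size - 7) * 128 := by
        rw [show (128:Nat) = 2^7 by norm_num, ← pow_add]; congr 1; omega
  · have h2 : 2 ^ (m.size - 8) ≤ m / 128 := by
      rw [Nat.le_div_iff_mul_le (by norm_num)]
      calc 2 ^ (m.size - 8) * 128 = 2 ^ (m.size - 1) := by
            rw [show (128:Nat) = 2^7 by norm_num, ← pow_add]; congr 1; omega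
      _ ≤ m := Nat.lt_size.mp (by omega)
    have := Nat.lt_size.mpr h2
    omega

theorem chunksOfA_length (v : Int) (h : 0 < v) :
    (chunksOfA v).length = (v.toNat.size + 6) / 7 := by
  rw [chunksOfA]
  simp [h]
  by_cases h128 : v < 128
  · have hs : v >>> (7:Nat) = 0 := by rw [Int.shiftRight_eq_div_pow]; norm_num; omega
    rw [hs, chunksOfA]
    simp
    have hlo : 0 < v.toNat.size := Nat.lt_size.mpr (by simpa using (by omega : 1 ≤ v.toNat))
    have hhi : v.toNat.size ≤ 7 := Nat.size_le.mpr (by omega)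
    omega
  · have hpos : 0 < v >>> (7:Nat) := by rw [Int.shiftRight_eq_div_pow]; norm_num; omega
    have ih := chunksOfA_length (v >>> (7:Nat)) hpos
    rw [ih, toNat_shift7 v (le_of_lt h), size_div128 v.toNat (by omega)]
    have h2 : (2:Nat)^7 ≤ v.toNat := by norm_num; omega
    have := Nat.lt_size.mpr h2
    omega
termination_by v.toNat
decreasing_by exact shift7_toNat_lt v h

theorem chunksOfA_eq_map (v : Int) (h : 0 < v) :
    chunksOfA v = (List.range (chunksOfA v).length).map
      (fun k : Nat => PySem.Int.band (v >>> (7 * k)) 127) := by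
  rw [chunksOfA]
  simp [h]
  by_cases h128 : v < 128
  · have hs : v >>> (7:Nat) = 0 := by rw [Int.shiftRight_eq_div_pow]; norm_num; omega
    rw [hs, chunksOfA]
    simp [List.range_succ]
  · have hpos : 0 < v >>> (7:Nat) := by rw [Int.shiftRight_eq_div_pow]; norm_num; omega
    have ih := chunksOfA_eq_map (v >>> (7:Nat)) hpos
    rw [List.range_succ_eq_map]
    simp only [List.map_cons, Nat.mul_zero, List.map_map]
    congr 1
    · simp
    rw [ih]
    simp only [List.length_map, List.length_range]
    apply List.map_congr_left
    intro k _
    simp only [Function.comp]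
    congr 1
    rw [show 7 * (k + 1) = 7 + 7 * k from by omega, Int.shiftRight_add]
termination_by v.toNat
decreasing_by exact shift7_toNat_lt v h

theorem emitA_encRev (rcs : List Int) (result : String) :
    emitA rcs.reverse result = result ++ encRev rcs := by
  induction rcs generalizing result with
  | nil => rw [emitA]; simp [encRev, PySem.List.pop?]
  | cons c tail ih =>
    cases tail with
    | nil =>
      rw [emitA]
      have hpop := PySem.List.pop?_last ([] : List Int) c
      simp at hpop
      simp [hpop, encRev]
    | cons d rest =>
      have hpop := PySem.List.pop?_last ((d :: rest).reverse) c
      have hlen : ((d :: rest).reverse ++ [c]).length > 1 := by simp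
      rw [show (c :: d :: rest).reverse = (d :: rest).reverse ++ [c] from by simp, emitA,
        if_pos hlen]
      split
      · next c1 rest1 hmatch =>
          rw [hpop] at hmatch
          simp only [Option.some.injEq, Prod.mk.injEq] at hmatch
          obtain ⟨rfl, rfl⟩ := hmatch
          rw [ih, encRev_cons, String.append_assoc]
      · next hmatch =>
          rw [hpop] at hmatch
          cases hmatch

theorem foldl_encRev (c : Int → Int) (js : List Int) (result : String)
    (hj : ∀ j ∈ js, 0 < j) :
    (js ++ [0]).foldl (fun r i => r ++ hex2 (if 0 < i then PySem.Int.bor (c i) 128 else c i)) result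
      = result ++ encRev ((js ++ [0]).map c) := by
  induction js generalizing result with
  | nil => simp [encRev]
  | cons j js ih =>
    have hjpos : 0 < j := hj j (by simp)
    simp only [List.cons_append, List.foldl_cons, if_pos hjpos]
    rw [ih _ (fun x hx => hj x (by simp [hx]))]
    have : ∃ d drest, (js ++ [0]).map c = d :: drest := by
      cases js <;> exact ⟨_, _, rfl⟩
    obtain ⟨d, drest, hd⟩ := this
    simp only [List.map_cons, hd, encRev_cons, String.append_assoc]

-- ===== VERDICT (by name: the statement is the Claim_ definition above) =====
theorem appenduint32_py_spec : Claim_equal_appenduint32_py := by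
  unfold Claim_equal_appenduint32_py
  intro v _ hpre
  unfold Spec_appenduint32_py
  by_cases h0 : v = 0
  · subst h0; decide
  · have hv : 0 < v := by unfold Pre_appenduint32_py at hpre; omega
    have hlenpos : 0 < (chunksOfA v).length := by
      rw [chunksOfA]; simp [hv]
    -- the closed-form count equals the length of A's chunk list
    have hlo : 0 < v.toNat.size := Nat.lt_size.mpr (by simpa using (by omega : 1 ≤ v.toNat))
    have hn : max 1 (PySem.Int.floordiv ((v.toNat.size : Int) + 6) 7) = ((chunksOfA v).length : Int) := by
      rw [PySem.Int.floordiv_eq_ediv_of_pos (by omega)]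
      rw [chunksOfA_length v hv]
      omega
    unfold appenduint32_py appenduint32_py_alt
    rw [if_neg (by simpa using h0)]
    simp only [hn, shift_intCast]
    set L := (chunksOfA v).length with hL
    -- the countdown range is js ++ [0]
    have hrange : PySem.List.pyRange ((L:Int) - 1) (-1) (-1)
        = (List.range (L-1)).map (fun k : Nat => (L:Int) - 1 - k) ++ [0] := by
      rw [PySem.List.pyRange_neg_one]
      have hT : (((L:Int) - 1) - (-1)).toNat = L := by omega
      rw [hT, show L = (L-1) + 1 from by omega, List.range_succ, List.map_append]
      simp
    rw [hrange]
    rw [foldl_encRev (fun i : Int => PySem.Int.band (v >>> (7 * i).toNat) 127)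
        ((List.range (L-1)).map (fun k : Nat => (L:Int) - 1 - k)) ""
        (by intro j hj; simp at hj; obtain ⟨k, hk, rfl⟩ := hj; omega)]
    -- A's side: emitA over the reversed chunk list
    rw [show chunksOfA v = ((chunksOfA v).reverse).reverse from by simp]
    rw [emitA_encRev]
    -- the two chunk lists coincide
    congr 1
    rw [chunksOfA_eq_map v hv, ← hL]
    congr 1
    apply List.ext_getElem
    · simp
      omega
    · intro i h1 h2
      simp only [List.length_reverse, List.length_map, List.length_range] at h1 h2
      rw [List.getElem_reverse]
      simp only [List.map_append, List.map_map, List.map_cons, List.map_nil,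
        List.getElem_map, List.getElem_range, List.length_map, List.length_range]
      by_cases hi : i < L - 1
      · rw [List.getElem_append_left (by simp; omega)]
        simp only [List.getElem_map, List.getElem_range, Function.comp]
        have he : (7 * ((L:Int) - 1 - (i:Nat))).toNat = 7 * (L - 1 - i) := by omega
        rw [he]
      · rw [List.getElem_append_right (by simp; omega)]
        simp only [List.length_map, List.length_range]
        have h0' : i - (L - 1) = 0 := by omega
        simp only [h0', List.getElem_cons_zero]
        have hz : L - 1 - i = 0 := by omega
        rw [hz]
        norm_num
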